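-- pv_equiv track=rewrite | github.com/Yiwei624/NutriWave | NutriWave_platform/core/engine.py | pick_default_ingredients
-- ===== SOURCE A (Python) =====
-- from typing import Dict, List, Any, Optional
--
-- def pick_default_ingredients(data: Dict[str, Any]) -> Dict[str, Any]:
--     ing = data.get("ingredients", [])
--     def first_cat(cat: str):
--         for it in ing:
--             if it.get("category") == cat:
--                 return it
--         return None
--     return {"protein": first_cat("protein"), "sweetener": first_cat("sweetener"), "stabilizer": first_cat("stabilizer")}
-- ===== SOURCE B (Python) =====
-- def pick_default_ingredients(data):
--     # One pass over the ingredients, keeping the first item seen per category.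
--     p = s = st = None
--     for it in data.get("ingredients", []):
--         cat = it.get("category")
--         if cat == "protein" and p is None:
--             p = it
--         elif cat == "sweetener" and s is None:
--             s = it
--         elif cat == "stabilizer" and st is None:
--             st = it
--     return {"protein": p, "sweetener": s, "stabilizer": st}
-- ===== Notes on version B (the rewrite author's own statement) =====
-- stated objective: alternative
-- what changed: B replaces A's three separate linear scans of the ingredient list (one per category) with a single pass that fills the first-occurrence slot for each of the three categories.
import Mathlib
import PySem

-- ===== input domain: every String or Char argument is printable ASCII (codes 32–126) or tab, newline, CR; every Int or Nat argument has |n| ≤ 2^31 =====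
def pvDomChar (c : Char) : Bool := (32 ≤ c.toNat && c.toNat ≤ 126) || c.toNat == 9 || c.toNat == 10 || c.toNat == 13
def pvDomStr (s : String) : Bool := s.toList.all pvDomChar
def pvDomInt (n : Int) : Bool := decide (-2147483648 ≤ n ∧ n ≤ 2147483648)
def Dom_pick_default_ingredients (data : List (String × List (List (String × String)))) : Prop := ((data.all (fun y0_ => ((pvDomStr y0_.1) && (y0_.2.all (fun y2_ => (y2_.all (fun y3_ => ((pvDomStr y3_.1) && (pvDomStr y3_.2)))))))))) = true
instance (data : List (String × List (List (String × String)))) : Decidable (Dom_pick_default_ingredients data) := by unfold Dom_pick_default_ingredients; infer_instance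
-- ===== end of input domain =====

-- B merges A's three per-category scans into one pass that keeps the first item seen per category.

-- dict.get(k) on an association list: first match, none if absent (shared by both ports)
def pvDictGet (d : List (String × String)) (k : String) : Option String :=
  (d.find? (fun p => p.1 == k)).map (·.2)

-- data.get("ingredients", [])
def pvIngredients (data : List (String × List (List (String × String)))) : List (List (String × String)) :=
  ((data.find? (fun p => p.1 == "ingredients")).map (·.2)).getD []

-- ===== PORT A =====
-- the inner 'def first_cat' loop: first item whose .get("category") == cat
def pvFirstCat (ing : List (List (String × String))) (cat : String) : Option (List (String × String)) :=
  match ing with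
  | [] => none
  | it :: rest => if pvDictGet it "category" = some cat then some it else pvFirstCat rest cat

def pick_default_ingredients (data : List (String × List (List (String × String)))) : List (String × Option (List (String × String))) :=
  let ing := pvIngredients data
  [("protein", pvFirstCat ing "protein"),
   ("sweetener", pvFirstCat ing "sweetener"),
   ("stabilizer", pvFirstCat ing "stabilizer")]

-- ===== PORT B =====
-- loop body of Source B: state (p, s, st)
def pvStep (r : Option (List (String × String)) × Option (List (String × String)) × Option (List (String × String)))
    (it : List (String × String)) :
    Option (List (String × String)) × Option (List (String × String)) × Option (List (String × String)) :=
  let cat := pvDictGet it "category"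
  if cat = some "protein" ∧ r.1 = none then (some it, r.2.1, r.2.2)
  else if cat = some "sweetener" ∧ r.2.1 = none then (r.1, some it, r.2.2)
  else if cat = some "stabilizer" ∧ r.2.2 = none then (r.1, r.2.1, some it)
  else r

def pick_default_ingredients_alt (data : List (String × List (List (String × String)))) : List (String × Option (List (String × String))) :=
  let fin := (pvIngredients data).foldl pvStep (none, none, none)
  [("protein", fin.1), ("sweetener", fin.2.1), ("stabilizer", fin.2.2)]

-- ===== PRECONDITION & SPEC =====
def Spec_pick_default_ingredients (data : List (String × List (List (String × String)))) (out : List (String × Option (List (String × String)))) : Prop := out = pick_default_ingredients_alt data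
instance (data : List (String × List (List (String × String)))) (out : List (String × Option (List (String × String)))) : Decidable (Spec_pick_default_ingredients data out) := by unfold Spec_pick_default_ingredients; infer_instance

-- ===== CLAIM (what is proved, stated in full; the proofs are below) =====
def Claim_equal_pick_default_ingredients : Prop := ∀ (data : List (String × List (List (String × String)))), Dom_pick_default_ingredients data → Spec_pick_default_ingredients data (pick_default_ingredients data)

-- ===== LEMMAS AND PROOFS =====

-- an already-filled slot stays; an empty slot gets the first matching item
def pvFill (a : Option (List (String × String))) (cat : String) (ing : List (List (String × String))) :
    Option (List (String × String)) :=
  match a with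
  | some x => some x
  | none => pvFirstCat ing cat

theorem pvFoldl_step (ing : List (List (String × String)))
    (p s st : Option (List (String × String))) :
    ing.foldl pvStep (p, s, st) =
      (pvFill p "protein" ing, pvFill s "sweetener" ing, pvFill st "stabilizer" ing) := by
  induction ing generalizing p s st with
  | nil => cases p <;> cases s <;> cases st <;> rfl
  | cons it rest ih =>
    simp only [List.foldl_cons]
    by_cases hp : pvDictGet it "category" = some "protein" ∧ p = none
    · simp only [pvStep, hp, if_pos, and_self]
      rw [ih]
      obtain ⟨hc, hpn⟩ := hp
      cases s <;> cases st <;>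
        simp_all [pvFill, pvFirstCat]
    · by_cases hs : pvDictGet it "category" = some "sweetener" ∧ s = none
      · simp only [pvStep, hs]
        rw [ih]
        obtain ⟨hc, hsn⟩ := hs
        cases p <;> cases st <;>
          simp_all [pvFill, pvFirstCat]
      · by_cases hst : pvDictGet it "category" = some "stabilizer" ∧ st = none
        · simp only [pvStep, hst]
          rw [ih]
          obtain ⟨hc, hstn⟩ := hst
          cases p <;> cases s <;>
            simp_all [pvFill, pvFirstCat]
        · simp only [pvStep, hp, hs, hst, ite_false]
          rw [ih]
          -- head item matches no (needed) slot: each pvFill unchanged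
          cases p <;> cases s <;> cases st <;>
            simp_all [pvFill, pvFirstCat]

-- ===== VERDICT (by name: the statement is the Claim_ definition above) =====
theorem pick_default_ingredients_spec : Claim_equal_pick_default_ingredients := by
  intro data _
  unfold Spec_pick_default_ingredients pick_default_ingredients pick_default_ingredients_alt
  rw [pvFoldl_step]
  rfl
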